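-- pv_equiv track=rewrite | github.com/Grant-Giesbrecht/ChillyInductor | RP-23 Scripts/SMC-A/Simulations/chirp_sim.py | find_duplicate_indices
-- ===== SOURCE A (Python) =====
-- import collections
--
-- def find_duplicate_indices(lst):
-- 	duplicates = {}
-- 	counter = collections.Counter(lst)
--
-- 	for index, value in enumerate(lst):
-- 		if counter[value] > 1:
-- 			if value not in duplicates:
-- 				duplicates[value] = []
-- 			duplicates[value].append(index)
-- 	return duplicates
-- ===== SOURCE B (Python) =====
-- def find_duplicate_indices(lst):
--     return {v: [j for j, w in enumerate(lst) if w == v]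
--             for i, v in enumerate(lst)
--             if v not in lst[:i] and lst.count(v) > 1}
-- ===== Notes on version B (the rewrite author's own statement) =====
-- stated objective: alternative
-- what changed: Replaces A's Counter pre-pass plus incremental dict population with a single dict comprehension of nested scans: each first occurrence of a value repeated more than once (detected by prefix membership) rescans the whole list to collect that value's indices; no auxiliary dict or counter is maintained.
import Mathlib
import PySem

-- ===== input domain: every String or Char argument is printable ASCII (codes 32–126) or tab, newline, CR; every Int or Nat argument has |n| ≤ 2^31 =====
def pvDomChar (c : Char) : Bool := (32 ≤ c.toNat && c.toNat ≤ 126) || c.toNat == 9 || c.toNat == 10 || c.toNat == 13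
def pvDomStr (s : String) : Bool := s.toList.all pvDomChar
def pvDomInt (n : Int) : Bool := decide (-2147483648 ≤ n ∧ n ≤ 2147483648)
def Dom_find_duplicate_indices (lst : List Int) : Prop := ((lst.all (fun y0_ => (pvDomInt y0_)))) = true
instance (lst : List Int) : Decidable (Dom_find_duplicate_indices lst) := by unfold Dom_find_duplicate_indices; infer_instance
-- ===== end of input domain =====

-- B replaces A's Counter-plus-incremental-dict loop with a dict comprehension of nested scans
-- (prefix-membership first-occurrence test, per-value index rescan); objective: alternative (B is O(n^2)).

-- ===== PORT A =====
-- Counter(lst); then for index, value in enumerate(lst): if counter[value] > 1: (init-if-absent; append).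
def find_duplicate_indices (lst : List Int) : List (Int × List Int) :=
  let counter := PySem.Dict.counter lst
  let duplicates := (PySem.List.enumerate lst).foldl
    (fun (d : PySem.Dict Int (List Int)) p =>
      if counter.getD p.2 0 > 1 then
        let d' := if d.contains p.2 then d else d.insert p.2 ([] : List Int)
        d'.modify p.2 [] (fun l => l ++ [p.1])
      else d)
    PySem.Dict.empty
  duplicates.items

-- ===== PORT B =====
-- {v: [j for j, w in enumerate(lst) if w == v] for i, v in enumerate(lst) if v not in lst[:i] and lst.count(v) > 1}
-- (a dict comprehension is the fold of insert over the filtered enumeration)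
def find_duplicate_indices_alt (lst : List Int) : List (Int × List Int) :=
  ((PySem.List.enumerate lst).foldl
    (fun (d : PySem.Dict Int (List Int)) p =>
      if !((PySem.List.slice lst none (some p.1)).contains p.2) && decide (1 < lst.count p.2) then
        d.insert p.2 (((PySem.List.enumerate lst).filter (fun r => r.2 == p.2)).map (·.1))
      else d)
    PySem.Dict.empty).items

-- ===== PRECONDITION & SPEC =====
def Spec_find_duplicate_indices (lst : List Int) (out : List (Int × List Int)) : Prop := out = find_duplicate_indices_alt lst
instance (lst : List Int) (out : List (Int × List Int)) : Decidable (Spec_find_duplicate_indices lst out) := by unfold Spec_find_duplicate_indices; infer_instance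

-- ===== CLAIM (what is proved, stated in full; the proofs are below) =====
def Claim_equal_find_duplicate_indices : Prop := ∀ (lst : List Int), Dom_find_duplicate_indices lst → Spec_find_duplicate_indices lst (find_duplicate_indices lst)

-- ===== LEMMAS AND PROOFS =====

-- Set.ofList commutes with filter.
theorem pv_add_filter {q : Int → Bool} (s : PySem.Set Int) (x : Int) :
    (PySem.Set.add s x).filter q = if q x then PySem.Set.add (s.filter q) x else s.filter q := by
  unfold PySem.Set.add
  by_cases hm : s.contains x
  · have hmem : x ∈ s := by simpa using hm
    simp only [hm, if_true]
    by_cases hq : q x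
    · have h1 : (s.filter q).contains x = true := by
        simp only [List.contains_iff_mem, List.mem_filter]
        exact ⟨hmem, hq⟩
      simp [hq, hmem]
    · simp [hq]
  · have hmem : x ∉ s := by simpa using hm
    simp only [hm]
    by_cases hq : q x
    · have h1 : (s.filter q).contains x = false := by
        simp only [Bool.eq_false_iff, ne_eq, List.contains_iff_mem, List.mem_filter]
        intro h
        exact hmem h.1
      simp [hq, List.filter_append, hmem]
    · simp [hq, List.filter_append]

theorem pv_foldl_add_filter (q : Int → Bool) (l : List Int) (s : PySem.Set Int) :
    (List.foldl PySem.Set.add s l).filter q = List.foldl PySem.Set.add (s.filter q) (l.filter q) := by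
  induction l generalizing s with
  | nil => rfl
  | cons x xs ih =>
    simp only [List.foldl_cons, ih, List.filter_cons]
    rw [pv_add_filter]
    by_cases hq : q x <;> simp [hq]

theorem pv_ofList_filter (q : Int → Bool) (l : List Int) :
    PySem.Set.ofList (l.filter q) = (PySem.Set.ofList l).filter q := by
  unfold PySem.Set.ofList
  rw [pv_foldl_add_filter]
  rfl

-- A's loop body, with the insert-if-absent fused into the modify.
theorem pv_stepA (d : PySem.Dict Int (List Int)) (v : Int) (i : Int) :
    (let d' := if d.contains v then d else d.insert v ([] : List Int)
     d'.modify v [] (fun l => l ++ [i])) = d.modify v [] (fun l => l ++ [i]) := by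
  by_cases hc : d.contains v
  · simp [hc]
  · simp only [hc]
    show (d.insert v []).modify v [] (fun l => l ++ [i]) = _
    unfold PySem.Dict.modify
    rw [PySem.Dict.getD_insert_self, PySem.Dict.insert_insert_self,
        PySem.Dict.getD_of_not_contains _ _ (by simpa using hc)]

-- first-occurrence dedup relative to a seen list
def pvDD (seen : List Int) : List Int → List Int
  | [] => []
  | x :: t => if seen.contains x then pvDD seen t else x :: pvDD (seen ++ [x]) t

theorem pvDD_nil (seen : List Int) : pvDD seen [] = [] := rfl

theorem pvDD_cons (seen : List Int) (x : Int) (t : List Int) :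
    pvDD seen (x :: t) = if seen.contains x then pvDD seen t else x :: pvDD (seen ++ [x]) t := rfl

theorem pvDD_congr (xs : List Int) (s1 s2 : List Int) (h : ∀ a, a ∈ s1 ↔ a ∈ s2) :
    pvDD s1 xs = pvDD s2 xs := by
  induction xs generalizing s1 s2 with
  | nil => rfl
  | cons x t ih =>
    have hc : s1.contains x = s2.contains x := by
      rw [List.contains_eq_mem, List.contains_eq_mem]
      exact decide_eq_decide.mpr (h x)
    rw [pvDD_cons, pvDD_cons, hc]
    by_cases h2 : s2.contains x
    · rw [if_pos h2, if_pos h2]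
      exact ih s1 s2 h
    · rw [if_neg h2, if_neg h2]
      refine congrArg (x :: ·) (ih _ _ ?_)
      intro a
      simp only [List.mem_append, List.mem_singleton]
      exact or_congr (h a) Iff.rfl

-- the prefix-membership filter over the enumeration lists exactly the first occurrences
theorem pv_enum_filter (xs : List Int) (seen : List Int) :
    (((PySem.List.enumerate xs (seen.length : Int)).filter
        (fun p => !(((seen ++ xs).take p.1.toNat).contains p.2))).map (·.2))
      = pvDD seen xs := by
  induction xs generalizing seen with
  | nil => simp [PySem.List.enumerate, pvDD_nil]
  | cons x t ih =>
    rw [PySem.List.enumerate_cons, List.filter_cons]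
    have hhead : (((seen ++ x :: t).take ((seen.length : Int)).toNat).contains x)
        = seen.contains x := by
      rw [Int.toNat_natCast, List.take_left]
    have harr : seen ++ x :: t = (seen ++ [x]) ++ t := by simp
    have hlen : (seen.length : Int) + 1 = ((seen ++ [x]).length : Int) := by
      simp [List.length_append]
    have htail : ((PySem.List.enumerate t ((seen.length : Int) + 1)).filter
        (fun p => !(((seen ++ x :: t).take p.1.toNat).contains p.2))).map (·.2)
        = pvDD (seen ++ [x]) t := by
      rw [harr, hlen]
      exact ih (seen ++ [x])
    by_cases hs : seen.contains x
    · simp only [hhead, hs, Bool.not_true, Bool.false_eq_true, if_false]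
      rw [htail, pvDD_cons, if_pos hs]
      exact pvDD_congr t (seen ++ [x]) seen (by
        intro a
        simp only [List.mem_append, List.mem_singleton]
        constructor
        · rintro (h | rfl)
          · exact h
          · simpa using hs
        · exact Or.inl)
    · simp only [hhead, hs, Bool.not_false, if_true, List.map_cons]
      rw [htail, pvDD_cons, if_neg hs]

theorem pv_dd_ofList (xs : List Int) : PySem.Set.ofList xs = pvDD [] xs := by
  have key : ∀ (xs seen : List Int),
      PySem.Set.update (PySem.Set.ofList seen) xs = PySem.Set.ofList seen ++ pvDD seen xs := by
    intro xs
    induction xs with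
    | nil =>
      intro seen
      rw [pvDD_nil, List.append_nil]
      rfl
    | cons x t ih =>
      intro seen
      have hupd : PySem.Set.update (PySem.Set.ofList seen) (x :: t)
          = PySem.Set.update (PySem.Set.add (PySem.Set.ofList seen) x) t := rfl
      have hofl : PySem.Set.ofList (seen ++ [x]) = PySem.Set.add (PySem.Set.ofList seen) x := by
        unfold PySem.Set.ofList
        rw [List.foldl_append]
        rfl
      by_cases hs : x ∈ seen
      · have hs' : seen.contains x = true := by simpa using hs
        have hadd : PySem.Set.add (PySem.Set.ofList seen) x = PySem.Set.ofList seen := by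
          unfold PySem.Set.add
          simp [PySem.Set.mem_ofList, hs]
        rw [hupd, hadd, ih seen, pvDD_cons, if_pos hs']
      · have hs' : seen.contains x = false := by simpa using hs
        have hadd : PySem.Set.add (PySem.Set.ofList seen) x = PySem.Set.ofList seen ++ [x] := by
          unfold PySem.Set.add
          simp [PySem.Set.mem_ofList, hs]
        have h1 := ih (seen ++ [x])
        rw [hofl, hadd] at h1
        rw [hupd, hadd, h1, pvDD_cons, if_neg (by simpa using hs : ¬seen.contains x = true)]
        simp
  have h0 := key xs []
  simpa [PySem.Set.update, PySem.Set.ofList] using h0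

-- corollary at the top level, in the port's slice-free form
theorem pv_fo_map (lst : List Int) :
    ((PySem.List.enumerate lst).filter
        (fun p => !((lst.take p.1.toNat).contains p.2))).map (·.2)
      = PySem.Set.ofList lst := by
  rw [pv_dd_ofList]
  have h := pv_enum_filter lst []
  simpa using h

-- ===== VERDICT (by name: the statement is the Claim_ definition above) =====
theorem find_duplicate_indices_spec : Claim_equal_find_duplicate_indices := by
  intro lst _
  unfold Spec_find_duplicate_indices find_duplicate_indices find_duplicate_indices_alt
  set q : Int → Bool := fun v => decide (1 < lst.count v) with hq
  set E := PySem.List.enumerate lst with hE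
  set idxs : Int → List Int := fun v => (E.filter (fun r => r.2 == v)).map (·.1) with hidxs
  -- common normal form
  have common :
      (E.foldl
        (fun (d : PySem.Dict Int (List Int)) p =>
          if !((lst.take p.1.toNat).contains p.2) && q p.2 then
            d.insert p.2 (idxs p.2)
          else d)
        PySem.Dict.empty).items
      = ((PySem.Set.ofList lst).filter q).map (fun k => (k, idxs k)) := by
    rw [PySem.List.foldl_if_eq_foldl_filter]
    have hkeys : (E.filter
          (fun p => !((lst.take p.1.toNat).contains p.2) && q p.2)).map (·.2)
        = (PySem.Set.ofList lst).filter q := by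
      have hsplit : E.filter (fun p => !((lst.take p.1.toNat).contains p.2) && q p.2)
          = (E.filter (fun p => !((lst.take p.1.toNat).contains p.2))).filter
              (fun p => q p.2) := by
        rw [List.filter_filter]
        exact List.filter_congr (fun p _ => by rw [Bool.and_comm])
      have hpush : ((E.filter (fun p => !((lst.take p.1.toNat).contains p.2))).filter
              (fun p => q p.2)).map (·.2)
          = ((E.filter (fun p => !((lst.take p.1.toNat).contains p.2))).map (·.2)).filter q := by
        rw [List.filter_map]
        rfl
      rw [hsplit, hpush, hE, pv_fo_map]
    have hnodup : ((E.filter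
          (fun p => !((lst.take p.1.toNat).contains p.2) && q p.2)).map (·.2)).Nodup := by
      rw [hkeys]
      exact List.Nodup.filter q (PySem.Set.nodup_ofList lst)
    rw [PySem.Dict.items_foldl_insert_fresh
          (E.filter (fun p => !((lst.take p.1.toNat).contains p.2) && q p.2))
          (fun p => p.2) (fun p => idxs p.2) PySem.Dict.empty
          (by intro a _; simp) hnodup]
    have hemp : (PySem.Dict.empty : PySem.Dict Int (List Int)).items = [] := rfl
    rw [hemp, List.nil_append, ← hkeys, List.map_map]
    rfl
  -- B is the common normal form
  have hB :
      (E.foldl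
        (fun (d : PySem.Dict Int (List Int)) p =>
          if !((PySem.List.slice lst none (some p.1)).contains p.2) && q p.2 then
            d.insert p.2 (idxs p.2)
          else d)
        PySem.Dict.empty).items
      = ((PySem.Set.ofList lst).filter q).map (fun k => (k, idxs k)) := by
    rw [← common]
    congr 1
    apply PySem.List.foldl_congr_mem
    intro d p hp
    have hnn : 0 ≤ p.1 := by
      rcases (PySem.List.mem_enumerate_iff lst 0 p).mp (hE ▸ hp) with ⟨k, hk, hpk⟩
      subst hpk
      simp
    rw [PySem.List.slice_to lst hnn]
  -- A is the common normal form
  have hA :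
      (E.foldl
        (fun (d : PySem.Dict Int (List Int)) p =>
          if (PySem.Dict.counter lst).getD p.2 0 > 1 then
            let d' := if d.contains p.2 then d else d.insert p.2 ([] : List Int)
            d'.modify p.2 [] (fun l => l ++ [p.1])
          else d)
        PySem.Dict.empty).items
      = ((PySem.Set.ofList lst).filter q).map (fun k => (k, idxs k)) := by
    have hstep : E.foldl
        (fun (d : PySem.Dict Int (List Int)) p =>
          if (PySem.Dict.counter lst).getD p.2 0 > 1 then
            let d' := if d.contains p.2 then d else d.insert p.2 ([] : List Int)
            d'.modify p.2 [] (fun l => l ++ [p.1])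
          else d)
        PySem.Dict.empty
        = (E.filter (fun p => q p.2)).foldl
          (fun (d : PySem.Dict Int (List Int)) p => d.modify p.2 [] (fun l => l ++ [p.1]))
          PySem.Dict.empty := by
      rw [← PySem.List.foldl_if_eq_foldl_filter]
      apply PySem.List.foldl_congr_mem
      intro d p _
      rw [pv_stepA]
      by_cases h : 1 < lst.count p.2
      · have h1 : (PySem.Dict.counter lst).getD p.2 0 > 1 := by
          rw [PySem.Dict.getD_counter]; exact_mod_cast h
        simp [hq, h]
      · have h1 : ¬ ((PySem.Dict.counter lst).getD p.2 0 > 1) := by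
          rw [PySem.Dict.getD_counter]; intro hc; exact h (by exact_mod_cast hc)
        simp [hq, h]
    rw [hstep]
    set GA := (E.filter (fun p => q p.2)).foldl
        (fun (d : PySem.Dict Int (List Int)) p => d.modify p.2 [] (fun l => l ++ [p.1]))
        PySem.Dict.empty with hGA
    have hkeysGA : GA.keys = (PySem.Set.ofList lst).filter q := by
      rw [hGA, PySem.Dict.keys_foldl_modify_key (E.filter (fun p => q p.2)) (fun p => p.2) []
            (fun _ p l => l ++ [p.1])]
      rw [PySem.Dict.keys_empty, PySem.Set.update_nil_left]
      have hswap : (E.filter (fun p => q p.2)).map (fun p => p.2)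
          = (E.map (fun p => p.2)).filter q := by
        rw [List.filter_map]
        rfl
      rw [hswap, hE, PySem.List.map_snd_enumerate, pv_ofList_filter]
    have hndGA : GA.keys.Nodup := by
      rw [hGA]
      exact PySem.Dict.nodup_keys_foldl_modify_key _ _ _ _ _ PySem.Dict.nodup_keys_empty
    have hGAget : ∀ v, q v = true → GA.getD v [] = idxs v := by
      intro v hv
      rw [hGA]
      rw [show ((E.filter (fun p => q p.2)).foldl
          (fun (d : PySem.Dict Int (List Int)) p => d.modify p.2 [] (fun l => l ++ [p.1]))
          PySem.Dict.empty)
        = (((E.filter (fun p => q p.2)).map Prod.swap).foldl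
          (fun (d : PySem.Dict Int (List Int)) p => d.modify p.1 [] (fun l => l ++ [p.2]))
          PySem.Dict.empty) from by rw [List.foldl_map]; rfl]
      rw [PySem.Dict.getD_foldl_modify_append]
      rw [PySem.Dict.getD_empty, List.nil_append]
      rw [List.filter_map, List.map_map]
      rw [hidxs]
      rw [List.filter_filter]
      refine congrArg (List.map _) (List.filter_congr ?_)
      intro p _
      show (((fun p : Int × Int => p.1 == v) ∘ Prod.swap) p && q p.2) = (p.2 == v)
      by_cases h : p.2 = v
      · simp [Prod.swap, h, hv]
      · simp [Prod.swap, h]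
    rw [PySem.Dict.items_eq_map_keys GA hndGA [], hkeysGA]
    apply List.map_congr_left
    intro k hk
    have hqk : q k = true := (List.mem_filter.mp hk).2
    rw [hGAget k hqk]
  rw [hA, hB]
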